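-- pv_equiv track=rewrite | github.com/AutomatosAI/automatos-ai | orchestrator/rag_service.py | _categorize_file_type
-- ===== SOURCE A (Python) =====
-- def _categorize_file_type(file_type: str) -> str:
--     """Categorize file types for context sources"""
--     file_type = file_type.lower()
--
--     if 'pdf' in file_type or 'doc' in file_type:
--         return 'Technical Docs'
--     elif 'md' in file_type or 'txt' in file_type:
--         return 'Documentation'
--     elif 'json' in file_type or 'yaml' in file_type or 'yml' in file_type:
--         return 'Configuration'
--     elif any(ext in file_type for ext in ['py', 'js', 'ts', 'java', 'cpp', 'c']):
--         return 'Code Files'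
--     else:
--         return 'Other'
-- ===== SOURCE B (Python) =====
-- _PRIORITY = {'pdf': 0, 'doc': 0, 'md': 1, 'txt': 1, 'json': 2, 'yaml': 2, 'yml': 2,
--              'py': 3, 'js': 3, 'ts': 3, 'java': 3, 'cpp': 3, 'c': 3}
-- _LABELS = ['Technical Docs', 'Documentation', 'Configuration', 'Code Files', 'Other']
--
--
-- def _categorize_file_type(file_type: str) -> str:
--     """Categorize file types for context sources"""
--     ft = file_type.lower()
--     best = 4
--     for kw, pr in _PRIORITY.items():
--         if pr < best and kw in ft:
--             best = pr
--     return _LABELS[best]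
-- ===== Notes on version B (the rewrite author's own statement) =====
-- stated objective: alternative
-- what changed: Replaced the ordered if/elif early-return chain by one exhaustive pass over a flat keyword-to-priority map that accumulates the minimum priority among all matching keywords and indexes a label array with it.
import Mathlib
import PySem

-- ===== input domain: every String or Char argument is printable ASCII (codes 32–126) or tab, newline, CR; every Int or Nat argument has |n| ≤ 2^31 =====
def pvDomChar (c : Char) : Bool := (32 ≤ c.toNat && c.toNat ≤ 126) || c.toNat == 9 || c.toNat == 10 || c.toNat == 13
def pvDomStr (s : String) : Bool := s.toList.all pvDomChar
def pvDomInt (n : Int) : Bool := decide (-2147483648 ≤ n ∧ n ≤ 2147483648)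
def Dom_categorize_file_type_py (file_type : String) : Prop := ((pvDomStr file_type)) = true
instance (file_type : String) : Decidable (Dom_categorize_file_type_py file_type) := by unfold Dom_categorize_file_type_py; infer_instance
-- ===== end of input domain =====

-- B replaces A's if/elif early-return chain by one exhaustive min-priority pass over a flat keyword map (alternative; same cost).

-- ===== PORT A =====
def categorize_file_type_py (file_type : String) : String :=
  let file_type := PySem.Str.lower file_type
  if PySem.Str.isIn "pdf" file_type || PySem.Str.isIn "doc" file_type then
    "Technical Docs"
  else if PySem.Str.isIn "md" file_type || PySem.Str.isIn "txt" file_type then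
    "Documentation"
  else if PySem.Str.isIn "json" file_type || PySem.Str.isIn "yaml" file_type || PySem.Str.isIn "yml" file_type then
    "Configuration"
  else if ["py", "js", "ts", "java", "cpp", "c"].any (fun ext => PySem.Str.isIn ext file_type) then
    "Code Files"
  else
    "Other"

-- ===== PORT B =====
-- flat keyword → priority map, iterated in insertion order (order is irrelevant to a min)
def pvPriority : List (String × Nat) :=
  [("pdf", 0), ("doc", 0), ("md", 1), ("txt", 1), ("json", 2), ("yaml", 2), ("yml", 2),
   ("py", 3), ("js", 3), ("ts", 3), ("java", 3), ("cpp", 3), ("c", 3)]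

def pvLabels : List String :=
  ["Technical Docs", "Documentation", "Configuration", "Code Files", "Other"]

-- loop body of Source B: `if pr < best and kw in ft: best = pr`
def pvStep (ft : String) (best : Nat) (p : String × Nat) : Nat :=
  if p.2 < best ∧ PySem.Str.isIn p.1 ft = true then p.2 else best

def categorize_file_type_py_alt (file_type : String) : String :=
  let ft := PySem.Str.lower file_type
  let best := pvPriority.foldl (pvStep ft) 4
  -- best ∈ [0,4], so the index is always in range; default never used
  (PySem.List.pyGet? pvLabels (best : Int)).getD ""

-- ===== PRECONDITION & SPEC =====
def Spec_categorize_file_type_py (file_type : String) (out : String) : Prop := out = categorize_file_type_py_alt file_type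
instance (file_type : String) (out : String) : Decidable (Spec_categorize_file_type_py file_type out) := by unfold Spec_categorize_file_type_py; infer_instance

-- ===== CLAIM (what is proved, stated in full; the proofs are below) =====
def Claim_equal_categorize_file_type_py : Prop := ∀ (file_type : String), Dom_categorize_file_type_py file_type → Spec_categorize_file_type_py file_type (categorize_file_type_py file_type)

-- ===== LEMMAS AND PROOFS =====

theorem pvStep_le (ft : String) (best : Nat) (p : String × Nat) : pvStep ft best p ≤ best := by
  unfold pvStep; split <;> omega

theorem pvFoldl_le (ft : String) (l : List (String × Nat)) (init : Nat) :
    l.foldl (pvStep ft) init ≤ init := by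
  induction l generalizing init with
  | nil => exact Nat.le_refl _
  | cons a l ih => exact Nat.le_trans (ih (pvStep ft init a)) (pvStep_le ft init a)

theorem pvFoldl_le_of_mem (ft : String) (l : List (String × Nat)) (init : Nat)
    (p : String × Nat) (hp : p ∈ l) (hm : PySem.Str.isIn p.1 ft = true) :
    l.foldl (pvStep ft) init ≤ p.2 := by
  induction l generalizing init with
  | nil => cases hp
  | cons a l ih =>
      rw [List.foldl_cons]
      rcases List.mem_cons.mp hp with rfl | hp'
      · have hstep : pvStep ft init p ≤ p.2 := by
          unfold pvStep; split
          · exact Nat.le_refl _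
          · rename_i h
            exact Nat.le_of_not_lt (fun hlt => h ⟨hlt, hm⟩)
        exact Nat.le_trans (pvFoldl_le ft l (pvStep ft init p)) hstep
      · exact ih (pvStep ft init a) hp'

theorem pvFoldl_mem (ft : String) (l : List (String × Nat)) (init : Nat) :
    l.foldl (pvStep ft) init = init ∨
      ∃ p ∈ l, PySem.Str.isIn p.1 ft = true ∧ l.foldl (pvStep ft) init = p.2 := by
  induction l generalizing init with
  | nil => exact Or.inl rfl
  | cons a l ih =>
      rcases ih (pvStep ft init a) with h | ⟨p, hp, hm, hv⟩
      · by_cases hc : a.2 < init ∧ PySem.Str.isIn a.1 ft = true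
        · refine Or.inr ⟨a, List.mem_cons_self .., hc.2, ?_⟩
          rw [List.foldl_cons, h]; unfold pvStep; rw [if_pos hc]
        · refine Or.inl ?_
          rw [List.foldl_cons, h]; unfold pvStep; rw [if_neg hc]
      · exact Or.inr ⟨p, List.mem_cons_of_mem a hp, hm, List.foldl_cons .. ▸ hv⟩

theorem categorize_eq (s : String) :
    categorize_file_type_py s = categorize_file_type_py_alt s := by
  have main : ∀ ft : String,
      (if PySem.Str.isIn "pdf" ft || PySem.Str.isIn "doc" ft then "Technical Docs"
       else if PySem.Str.isIn "md" ft || PySem.Str.isIn "txt" ft then "Documentation"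
       else if PySem.Str.isIn "json" ft || PySem.Str.isIn "yaml" ft || PySem.Str.isIn "yml" ft then "Configuration"
       else if (["py", "js", "ts", "java", "cpp", "c"] : List String).any (fun ext => PySem.Str.isIn ext ft) then "Code Files"
       else "Other")
      = (PySem.List.pyGet? pvLabels ((pvPriority.foldl (pvStep ft) 4 : Nat) : Int)).getD "" := by
    intro ft
    have hmem := pvFoldl_mem ft pvPriority 4
    by_cases h1 : (PySem.Str.isIn "pdf" ft || PySem.Str.isIn "doc" ft) = true
    · rw [if_pos h1]
      have hub : pvPriority.foldl (pvStep ft) 4 ≤ 0 := by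
        rcases Bool.or_eq_true_iff.mp h1 with h | h
        · exact pvFoldl_le_of_mem ft pvPriority 4 ("pdf", 0) (by simp [pvPriority]) h
        · exact pvFoldl_le_of_mem ft pvPriority 4 ("doc", 0) (by simp [pvPriority]) h
      have hr : pvPriority.foldl (pvStep ft) 4 = 0 := Nat.le_zero.mp hub
      rw [hr]; rfl
    · rw [if_neg h1]
      simp only [Bool.or_eq_true, not_or] at h1
      obtain ⟨hpdf, hdoc⟩ := h1
      by_cases h2 : (PySem.Str.isIn "md" ft || PySem.Str.isIn "txt" ft) = true
      · rw [if_pos h2]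
        have hub : pvPriority.foldl (pvStep ft) 4 ≤ 1 := by
          rcases Bool.or_eq_true_iff.mp h2 with h | h
          · exact pvFoldl_le_of_mem ft pvPriority 4 ("md", 1) (by simp [pvPriority]) h
          · exact pvFoldl_le_of_mem ft pvPriority 4 ("txt", 1) (by simp [pvPriority]) h
        have hr : pvPriority.foldl (pvStep ft) 4 = 1 := by
          rcases hmem with h4 | ⟨⟨kw, pr⟩, hp, hm, hv⟩
          · omega
          · simp only [pvPriority, List.mem_cons, List.not_mem_nil, or_false, Prod.mk.injEq] at hp
            rcases hp with ⟨rfl, rfl⟩ | ⟨rfl, rfl⟩ | ⟨rfl, rfl⟩ | ⟨rfl, rfl⟩ | ⟨rfl, rfl⟩ | ⟨rfl, rfl⟩ | ⟨rfl, rfl⟩ | ⟨rfl, rfl⟩ | ⟨rfl, rfl⟩ | ⟨rfl, rfl⟩ | ⟨rfl, rfl⟩ | ⟨rfl, rfl⟩ | ⟨rfl, rfl⟩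
            · exact absurd hm hpdf
            · exact absurd hm hdoc
            all_goals omega
        rw [hr]; rfl
      · rw [if_neg h2]
        simp only [Bool.or_eq_true, not_or] at h2
        obtain ⟨hmd, htxt⟩ := h2
        by_cases h3 : (PySem.Str.isIn "json" ft || PySem.Str.isIn "yaml" ft || PySem.Str.isIn "yml" ft) = true
        · rw [if_pos h3]
          have hub : pvPriority.foldl (pvStep ft) 4 ≤ 2 := by
            rcases Bool.or_eq_true_iff.mp h3 with h | h
            · rcases Bool.or_eq_true_iff.mp h with h' | h'
              · exact pvFoldl_le_of_mem ft pvPriority 4 ("json", 2) (by simp [pvPriority]) h'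
              · exact pvFoldl_le_of_mem ft pvPriority 4 ("yaml", 2) (by simp [pvPriority]) h'
            · exact pvFoldl_le_of_mem ft pvPriority 4 ("yml", 2) (by simp [pvPriority]) h
          have hr : pvPriority.foldl (pvStep ft) 4 = 2 := by
            rcases hmem with h4 | ⟨⟨kw, pr⟩, hp, hm, hv⟩
            · omega
            · simp only [pvPriority, List.mem_cons, List.not_mem_nil, or_false, Prod.mk.injEq] at hp
              rcases hp with ⟨rfl, rfl⟩ | ⟨rfl, rfl⟩ | ⟨rfl, rfl⟩ | ⟨rfl, rfl⟩ | ⟨rfl, rfl⟩ | ⟨rfl, rfl⟩ | ⟨rfl, rfl⟩ | ⟨rfl, rfl⟩ | ⟨rfl, rfl⟩ | ⟨rfl, rfl⟩ | ⟨rfl, rfl⟩ | ⟨rfl, rfl⟩ | ⟨rfl, rfl⟩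
              · exact absurd hm hpdf
              · exact absurd hm hdoc
              · exact absurd hm hmd
              · exact absurd hm htxt
              all_goals omega
          rw [hr]; rfl
        · rw [if_neg h3]
          simp only [Bool.or_eq_true, not_or] at h3
          obtain ⟨⟨hjson, hyaml⟩, hyml⟩ := h3
          by_cases h4 : ((["py", "js", "ts", "java", "cpp", "c"] : List String).any (fun ext => PySem.Str.isIn ext ft)) = true
          · rw [if_pos h4]
            have hub : pvPriority.foldl (pvStep ft) 4 ≤ 3 := by
              simp only [List.any_cons, List.any_nil, Bool.or_false, Bool.or_eq_true] at h4
              rcases h4 with h | h | h | h | h | h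
              · exact pvFoldl_le_of_mem ft pvPriority 4 ("py", 3) (by simp [pvPriority]) h
              · exact pvFoldl_le_of_mem ft pvPriority 4 ("js", 3) (by simp [pvPriority]) h
              · exact pvFoldl_le_of_mem ft pvPriority 4 ("ts", 3) (by simp [pvPriority]) h
              · exact pvFoldl_le_of_mem ft pvPriority 4 ("java", 3) (by simp [pvPriority]) h
              · exact pvFoldl_le_of_mem ft pvPriority 4 ("cpp", 3) (by simp [pvPriority]) h
              · exact pvFoldl_le_of_mem ft pvPriority 4 ("c", 3) (by simp [pvPriority]) h
            have hr : pvPriority.foldl (pvStep ft) 4 = 3 := by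
              rcases hmem with h4' | ⟨⟨kw, pr⟩, hp, hm, hv⟩
              · omega
              · simp only [pvPriority, List.mem_cons, List.not_mem_nil, or_false, Prod.mk.injEq] at hp
                rcases hp with ⟨rfl, rfl⟩ | ⟨rfl, rfl⟩ | ⟨rfl, rfl⟩ | ⟨rfl, rfl⟩ | ⟨rfl, rfl⟩ | ⟨rfl, rfl⟩ | ⟨rfl, rfl⟩ | ⟨rfl, rfl⟩ | ⟨rfl, rfl⟩ | ⟨rfl, rfl⟩ | ⟨rfl, rfl⟩ | ⟨rfl, rfl⟩ | ⟨rfl, rfl⟩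
                · exact absurd hm hpdf
                · exact absurd hm hdoc
                · exact absurd hm hmd
                · exact absurd hm htxt
                · exact absurd hm hjson
                · exact absurd hm hyaml
                · exact absurd hm hyml
                all_goals omega
            rw [hr]; rfl
          · rw [if_neg h4]
            simp only [List.any_cons, List.any_nil, Bool.or_false, Bool.or_eq_true, not_or] at h4
            obtain ⟨hpy, hjs, hts, hjava, hcpp, hc⟩ := h4
            have hr : pvPriority.foldl (pvStep ft) 4 = 4 := by
              rcases hmem with h4' | ⟨⟨kw, pr⟩, hp, hm, hv⟩
              · exact h4'
              · simp only [pvPriority, List.mem_cons, List.not_mem_nil, or_false, Prod.mk.injEq] at hp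
                rcases hp with ⟨rfl, rfl⟩ | ⟨rfl, rfl⟩ | ⟨rfl, rfl⟩ | ⟨rfl, rfl⟩ | ⟨rfl, rfl⟩ | ⟨rfl, rfl⟩ | ⟨rfl, rfl⟩ | ⟨rfl, rfl⟩ | ⟨rfl, rfl⟩ | ⟨rfl, rfl⟩ | ⟨rfl, rfl⟩ | ⟨rfl, rfl⟩ | ⟨rfl, rfl⟩
                · exact absurd hm hpdf
                · exact absurd hm hdoc
                · exact absurd hm hmd
                · exact absurd hm htxt
                · exact absurd hm hjson
                · exact absurd hm hyaml
                · exact absurd hm hyml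
                · exact absurd hm hpy
                · exact absurd hm hjs
                · exact absurd hm hts
                · exact absurd hm hjava
                · exact absurd hm hcpp
                · exact absurd hm hc
            rw [hr]; rfl
  exact main (PySem.Str.lower s)

-- ===== VERDICT (by name: the statement is the Claim_ definition above) =====
theorem categorize_file_type_py_spec : Claim_equal_categorize_file_type_py := by
  intro ft _
  unfold Spec_categorize_file_type_py
  exact categorize_eq ft
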